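-- pv_equiv track=rewrite | github.com/RMardonesT/BasesDeDatos | Entrega_2/funcionesPopulacion.py | unpackDLC
-- ===== SOURCE A (Python) =====
-- def unpackDLC(dlcs):
--     retorno = {}
--     for dlc in dlcs:
--         idGame = dlc[1]
--         idDLC = dlc[0]
--         if (idGame in retorno.keys()):
--             retorno[idGame] += [idDLC]
--         else:
--             retorno[idGame] = [idDLC]
--     return retorno
-- ===== SOURCE B (Python) =====
-- def unpackDLC(dlcs):
--     # alternative decomposition: first collect the game ids in first-occurrence
--     # order, then build each group by a scan over the whole input per key
--     seen = []
--     for d in dlcs: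
--         if d[1] not in seen:
--             seen.append(d[1])
--     return {g: [d[0] for d in dlcs if d[1] == g] for g in seen}
-- ===== Notes on version B (the rewrite author's own statement) =====
-- stated objective: alternative
-- what changed: A builds the groups in one hash-dict pass that mutates per-key lists; B first collects the distinct game ids in first-occurrence order and then builds each group by an independent filter scan of the input per key (dict comprehension, no mutation).
-- outside the precondition, e.g. on unpackDLC([(1,)]): A raises IndexError, B raises IndexError
import Mathlib
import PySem

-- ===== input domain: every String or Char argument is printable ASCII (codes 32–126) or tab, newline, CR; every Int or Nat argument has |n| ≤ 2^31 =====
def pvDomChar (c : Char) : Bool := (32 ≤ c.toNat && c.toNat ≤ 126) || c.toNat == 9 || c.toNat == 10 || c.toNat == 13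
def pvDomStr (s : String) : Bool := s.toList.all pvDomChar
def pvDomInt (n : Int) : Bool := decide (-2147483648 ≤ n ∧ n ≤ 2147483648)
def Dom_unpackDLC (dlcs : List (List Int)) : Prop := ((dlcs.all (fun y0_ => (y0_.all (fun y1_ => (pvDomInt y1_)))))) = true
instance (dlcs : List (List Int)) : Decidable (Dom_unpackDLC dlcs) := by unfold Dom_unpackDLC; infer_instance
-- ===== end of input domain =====

-- ===== PORT A =====
-- B groups by an ordered distinct-key pass plus a per-key filter scan instead of A's mutating dict pass; same return value.
def unpackDLC (dlcs : List (List Int)) : List (Int × List Int) :=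
  (dlcs.foldl (fun retorno dlc =>
    match PySem.List.pyGet? dlc 1, PySem.List.pyGet? dlc 0 with
    | some idGame, some idDLC =>
        if retorno.contains idGame then
          retorno.modify idGame [] (· ++ [idDLC])     -- retorno[idGame] += [idDLC]
        else
          retorno.insert idGame [idDLC]               -- retorno[idGame] = [idDLC]
    | _, _ => retorno                                 -- IndexError: excluded by Pre_
    ) (PySem.Dict.empty : PySem.Dict Int (List Int))).items

-- ===== PORT B =====
def unpackDLC_alt (dlcs : List (List Int)) : List (Int × List Int) :=
  let seen := dlcs.foldl (fun s d =>
    match PySem.List.pyGet? d 1 with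
    | some g => if s.contains g then s else s ++ [g]
    | none => s                                       -- IndexError: excluded by Pre_
    ) ([] : List Int)
  seen.map (fun g =>
    (g, (dlcs.filter (fun d => PySem.List.pyGet? d 1 == some g)).filterMap
          (fun d => PySem.List.pyGet? d 0)))

-- ===== PRECONDITION & SPEC =====
-- Pre_ excludes exactly the inputs on which Python A raises IndexError (an inner list with
-- fewer than two elements); B raises there too.
def Pre_unpackDLC (dlcs : List (List Int)) : Prop := ∀ d ∈ dlcs, 2 ≤ d.length
instance (dlcs : List (List Int)) : Decidable (Pre_unpackDLC dlcs) := by unfold Pre_unpackDLC; infer_instance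
def pvWitness_unpackDLC : List (List Int) := [[10, 1], [11, 2], [12, 1]]
def Spec_unpackDLC (dlcs : List (List Int)) (out : List (Int × List Int)) : Prop := out = unpackDLC_alt dlcs
instance (dlcs : List (List Int)) (out : List (Int × List Int)) : Decidable (Spec_unpackDLC dlcs out) := by unfold Spec_unpackDLC; infer_instance

-- ===== CLAIM (what is proved, stated in full; the proofs are below) =====
def Claim_equal_unpackDLC : Prop := ∀ (dlcs : List (List Int)), Dom_unpackDLC dlcs → Pre_unpackDLC dlcs → Spec_unpackDLC dlcs (unpackDLC dlcs)

-- ===== LEMMAS AND PROOFS =====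

-- totalised key/value of one row (equal to pyGet? under Pre_)
def pvKey (d : List Int) : Int := (PySem.List.pyGet? d 1).getD 0
def pvVal (d : List Int) : Int := (PySem.List.pyGet? d 0).getD 0

theorem pvGet1_eq (d : List Int) (h : 2 ≤ d.length) :
    PySem.List.pyGet? d 1 = some (pvKey d) := by
  match d, h with
  | a :: b :: t, _ => simp [PySem.List.pyGet?, PySem.List.pyIdx?, pvKey]

theorem pvGet0_eq (d : List Int) (h : 2 ≤ d.length) :
    PySem.List.pyGet? d 0 = some (pvVal d) := by
  match d, h with
  | a :: b :: t, _ =>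
    have h0 : (0:Int) ≤ (t.length:Int) + 1 := by positivity
    simp [PySem.List.pyGet?, PySem.List.pyIdx?, pvVal, h0]

-- A's step coincides with a plain modify loop under Pre_
theorem pvStep_eq (d : List Int) (h : 2 ≤ d.length) (r : PySem.Dict Int (List Int)) :
    (match PySem.List.pyGet? d 1, PySem.List.pyGet? d 0 with
     | some idGame, some idDLC =>
        if r.contains idGame then r.modify idGame [] (· ++ [idDLC])
        else r.insert idGame [idDLC]
     | _, _ => r) = r.modify (pvKey d) [] (· ++ [pvVal d]) := by
  rw [pvGet1_eq d h, pvGet0_eq d h]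
  by_cases hc : r.contains (pvKey d)
  · simp [hc]
  · have hcf : r.contains (pvKey d) = false := eq_false_of_ne_true hc
    simp [hc, PySem.Dict.modify, PySem.Dict.getD_of_not_contains r [] hcf]

theorem pvA_eq (dlcs : List (List Int)) (hpre : Pre_unpackDLC dlcs) :
    unpackDLC dlcs =
      ((dlcs.map (fun d => (pvKey d, pvVal d))).foldl
        (fun r p => r.modify p.1 [] (· ++ [p.2])) PySem.Dict.empty).items := by
  unfold unpackDLC
  rw [List.foldl_map]
  congr 1
  exact PySem.List.foldl_congr_mem _ _ _ _ (fun r d hd => pvStep_eq d (hpre d hd) r)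

theorem pvSeen_eq (dlcs : List (List Int)) (hpre : Pre_unpackDLC dlcs) :
    dlcs.foldl (fun s d =>
      match PySem.List.pyGet? d 1 with
      | some g => if s.contains g then s else s ++ [g]
      | none => s) ([] : List Int) = PySem.Set.ofList (dlcs.map pvKey) := by
  have h1 : dlcs.foldl (fun s d =>
      match PySem.List.pyGet? d 1 with
      | some g => if s.contains g then s else s ++ [g]
      | none => s) ([] : List Int)
      = dlcs.foldl (fun s d => PySem.Set.add s (pvKey d)) ([] : List Int) := by
    refine PySem.List.foldl_congr_mem _ _ _ _ (fun s d hd => ?_)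
    rw [pvGet1_eq d (hpre d hd)]
    simp [PySem.Set.add_eq_ite]
  rw [h1, ← PySem.Set.update_map_eq_foldl_add, PySem.Set.update_nil_left]

theorem pvGroup_eq (dlcs : List (List Int)) (hpre : Pre_unpackDLC dlcs) (g : Int) :
    (dlcs.filter (fun d => PySem.List.pyGet? d 1 == some g)).filterMap
      (fun d => PySem.List.pyGet? d 0)
    = ((dlcs.map (fun d => (pvKey d, pvVal d))).filter (fun p => p.1 == g)).map (·.2) := by
  induction dlcs with
  | nil => rfl
  | cons d t ih =>
    have hd2 : 2 ≤ d.length := hpre d List.mem_cons_self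
    have hpt : Pre_unpackDLC t := fun x hx => hpre x (List.mem_cons_of_mem _ hx)
    by_cases hg : (pvKey d == g) = true
    · simp [pvGet1_eq d hd2, pvGet0_eq d hd2, hg, ih hpt]
    · simp [pvGet1_eq d hd2, hg, ih hpt]

-- ===== VERDICT (by name: the statement is the Claim_ definition above) =====
theorem unpackDLC_spec : Claim_equal_unpackDLC := by
  intro dlcs _ hpre
  unfold Spec_unpackDLC unpackDLC_alt
  rw [pvA_eq dlcs hpre, pvSeen_eq dlcs hpre]
  set ps := dlcs.map (fun d => (pvKey d, pvVal d)) with hps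
  set D := ps.foldl (fun r p => r.modify p.1 [] (· ++ [p.2])) PySem.Dict.empty with hD
  have hkeys : D.keys = PySem.Set.ofList (dlcs.map pvKey) := by
    rw [hD, PySem.Dict.keys_foldl_modify_key]
    simp only [hps, List.map_map, PySem.Dict.keys_empty]
    rw [PySem.Set.update_nil_left]
    rfl
  have hnd : D.keys.Nodup := by rw [hkeys]; exact PySem.Set.nodup_ofList _
  rw [PySem.Dict.items_eq_map_keys D hnd [], hkeys]
  refine List.map_congr_left (fun g hg => ?_)
  rw [pvGroup_eq dlcs hpre g]
  have := PySem.Dict.getD_foldl_modify_append ps (PySem.Dict.empty : PySem.Dict Int (List Int)) g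
  simp only [PySem.Dict.getD_empty, List.nil_append] at this
  rw [hD, this]
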